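-- pv_equiv track=rewrite | github.com/zhenyulin/py-neetcode | src/array_2d/search_shortest_spread.py | shortestSpread
-- ===== SOURCE A (Python) =====
-- from collections import deque
--
-- def shortestSpread(grid: list[list[int]]) -> int:
--     """Shortest ~ BFS.
--
--     1) BFS
--
--     time complexity: O(M*N), space complexity: O(K)
--     """
--     M, N = len(grid), len(grid[0])
--     turn, target, queue = 0, 0, deque()
--
--     for i in range(M):
--         for j in range(N):
--             if grid[i][j] == 2:
--                 queue.append((i, j))
--             elif grid[i][j] == 1:
--                 target += 1
--
--     while target and queue:
--         for _ in range(len(queue)):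
--             i, j = queue.popleft()
--
--             for ni, nj in (i + 1, j), (i - 1, j), (i, j + 1), (i, j - 1):
--                 if 0 <= ni < M and 0 <= nj < N and grid[ni][nj] == 1:
--                     grid[ni][nj] = 2
--                     queue.append((ni, nj))
--                     target -= 1
--
--         turn += 1
--
--     return -1 if target else turn
-- ===== SOURCE B (Python) =====
-- def shortestSpread(grid: list[list[int]]) -> int:
--     """Synchronous cellular-automaton flood fill: no queue -- repeatedly rewrite
--     the whole grid, turning every 1 that touches a 2 into a 2, until nothing
--     changes; count the productive rewrites.  (Return-value equivalent to the
--     BFS original; works on a copy, so unlike A it does not mutate `grid`.)"""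
--     M, N = len(grid), len(grid[0])
--     g = [[grid[i][j] for j in range(N)] for i in range(M)]
--     turns = 0
--     while any(cell == 1 for row in g for cell in row):
--         nxt = [[2 if g[i][j] == 1 and any(
--                     0 <= ni < M and 0 <= nj < N and g[ni][nj] == 2
--                     for ni, nj in ((i + 1, j), (i - 1, j), (i, j + 1), (i, j - 1)))
--                 else g[i][j]
--                 for j in range(N)] for i in range(M)]
--         if nxt == g:
--             return -1
--         g = nxt
--         turns += 1
--     return turns
-- ===== Notes on version B (the rewrite author's own statement) =====
-- stated objective: alternative
-- what changed: Replaces the queue-based multi-source BFS (deque of frontier cells, level batching, a remaining-ones counter) by a queue-free synchronous cellular-automaton fixpoint iteration: each round rebuilds the whole grid, turning every 1 adjacent to a 2 into a 2, until an unchanged-grid test detects the fixpoint; the round count is the answer.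
import Mathlib
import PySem

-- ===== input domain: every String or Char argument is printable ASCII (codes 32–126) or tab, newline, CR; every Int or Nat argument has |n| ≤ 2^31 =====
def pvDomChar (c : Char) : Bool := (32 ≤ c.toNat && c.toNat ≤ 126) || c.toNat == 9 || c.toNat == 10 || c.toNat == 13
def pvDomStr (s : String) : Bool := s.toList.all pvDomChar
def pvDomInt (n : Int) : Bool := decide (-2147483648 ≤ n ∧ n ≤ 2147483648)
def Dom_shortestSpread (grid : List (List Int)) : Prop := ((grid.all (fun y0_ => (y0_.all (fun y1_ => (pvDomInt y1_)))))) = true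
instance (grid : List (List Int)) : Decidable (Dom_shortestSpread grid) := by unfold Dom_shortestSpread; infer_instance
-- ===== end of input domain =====

-- B replaces A's queue-based BFS by a queue-free synchronous cellular-automaton fixpoint
-- iteration (rebuild the whole grid each round until nothing changes); equivalence is about
-- the return value only: A mutates `grid` in place, B works on a copy and does not.

-- shared transliteration primitives: `grid[i][j]` read and `grid[i][j] = 2` write
-- (all accesses in both Pythons are guarded by `0 <= i` so a nonneg-index read is exact;
--  the pyGetD default is never returned on inputs satisfying Pre_)
def pvCell (g : List (List Int)) (i j : Int) : Int :=
  PySem.List.pyGetD (PySem.List.pyGetD g i []) j 0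

def pvSet2 (g : List (List Int)) (i j : Int) : List (List Int) :=
  PySem.List.pySetD g i (PySem.List.pySetD (PySem.List.pyGetD g i []) j 2)

-- ===== PORT A =====
-- one neighbour candidate of the popped cell: `if 0 <= ni < M and 0 <= nj < N and grid[ni][nj] == 1`
def pvNbrA (M N : Int) (st : List (List Int) × List (Int × Int) × Int) (p : Int × Int) :
    List (List Int) × List (Int × Int) × Int :=
  if 0 ≤ p.1 ∧ p.1 < M ∧ 0 ≤ p.2 ∧ p.2 < N ∧ pvCell st.1 p.1 p.2 = 1 then
    (pvSet2 st.1 p.1 p.2, st.2.1 ++ [p], st.2.2 - 1)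
  else st

-- `i, j = queue.popleft()` followed by the loop over the 4 neighbour tuples
def pvStepA (M N : Int) (st : List (List Int) × List (Int × Int) × Int) (i j : Int) :
    List (List Int) × List (Int × Int) × Int :=
  [(i + 1, j), (i - 1, j), (i, j + 1), (i, j - 1)].foldl (pvNbrA M N) st

-- `for _ in range(len(queue)): ...` : n pops from the front of the deque
def pvPopsA (M N : Int) : Nat → List (List Int) × List (Int × Int) × Int →
    List (List Int) × List (Int × Int) × Int
  | 0, st => st
  | n + 1, st =>
    match st with
    | (g, [], t) => (g, [], t)
    | (g, c :: rest, t) => pvPopsA M N n (pvStepA M N (g, rest, t) c.1 c.2)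

-- `while target and queue: ... turn += 1` ; `return -1 if target else turn`
-- (fuel only makes the recursion structural; it is never exhausted on reachable states)
def pvLoopA (M N : Int) : Nat → List (List Int) × List (Int × Int) × Int → Int → Int
  | 0, st, turn => if st.2.2 ≠ 0 then -1 else turn
  | fuel + 1, st, turn =>
    if st.2.2 ≠ 0 ∧ st.2.1 ≠ [] then
      pvLoopA M N fuel (pvPopsA M N st.2.1.length st) (turn + 1)
    else if st.2.2 ≠ 0 then -1 else turn

-- the initial double scan filling `queue` and `target`
def pvScanA (g : List (List Int)) (M N : Int) : List (Int × Int) × Int :=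
  (PySem.List.pyRange 0 M 1).foldl (fun qt i =>
    (PySem.List.pyRange 0 N 1).foldl (fun qt j =>
      if pvCell g i j = 2 then (qt.1 ++ [(i, j)], qt.2)
      else if pvCell g i j = 1 then (qt.1, qt.2 + 1)
      else qt) qt) ([], 0)

def shortestSpread (grid : List (List Int)) : Int :=
  let M : Int := grid.length
  let N : Int := (PySem.List.pyGetD grid 0 []).length
  let qt := pvScanA grid M N
  pvLoopA M N (qt.2.toNat + 1) (grid, qt.1, qt.2) 0

-- ===== PORT B =====
-- number of 1-cells inside the M×N window (only used as structural fuel for B's while loop,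
-- which terminates because every productive round removes at least one 1)
def pvCnt (M N : Int) (g : List (List Int)) : Nat :=
  ((PySem.List.pyRange 0 M 1).map (fun i =>
    ((PySem.List.pyRange 0 N 1).filter (fun j => pvCell g i j == 1)).length)).sum

-- `g[i][j] == 1 and any(0 <= ni < M and 0 <= nj < N and g[ni][nj] == 2 for ni, nj in ...)`
def pvHot (M N : Int) (g : List (List Int)) (i j : Int) : Bool :=
  (pvCell g i j == 1) &&
    ([(i + 1, j), (i - 1, j), (i, j + 1), (i, j - 1)].any (fun p =>
      decide (0 ≤ p.1 ∧ p.1 < M ∧ 0 ≤ p.2 ∧ p.2 < N) && (pvCell g p.1 p.2 == 2)))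

-- `nxt = [[2 if ... else g[i][j] for j in range(N)] for i in range(M)]`
def pvStepCA (M N : Int) (g : List (List Int)) : List (List Int) :=
  (PySem.List.pyRange 0 M 1).map (fun i =>
    (PySem.List.pyRange 0 N 1).map (fun j =>
      if pvHot M N g i j then 2 else pvCell g i j))

-- `any(cell == 1 for row in g for cell in row)`
def pvAnyOne (g : List (List Int)) : Bool := g.any (fun row => row.any (fun c => c == 1))

-- `while any(...): nxt = ...; if nxt == g: return -1; g = nxt; turns += 1` ; `return turns`
-- (fuel only makes the recursion structural; it is never exhausted on reachable states)
def pvLoopCA (M N : Int) : Nat → List (List Int) → Int → Int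
  | 0, g, turns => if pvAnyOne g then -1 else turns
  | fuel + 1, g, turns =>
    if pvAnyOne g then
      if pvStepCA M N g = g then -1
      else pvLoopCA M N fuel (pvStepCA M N g) (turns + 1)
    else turns

-- `g = [[grid[i][j] for j in range(N)] for i in range(M)]`
def pvCopy (grid : List (List Int)) (M N : Int) : List (List Int) :=
  (PySem.List.pyRange 0 M 1).map (fun i =>
    (PySem.List.pyRange 0 N 1).map (fun j => pvCell grid i j))

def shortestSpread_alt (grid : List (List Int)) : Int :=
  let M : Int := grid.length
  let N : Int := (PySem.List.pyGetD grid 0 []).length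
  let g := pvCopy grid M N
  pvLoopCA M N (pvCnt M N g + 1) g 0

-- ===== PRECONDITION & SPEC =====
-- Pre_ excludes exactly the inputs where the Python raises IndexError: the empty grid
-- (grid[0]) and grids with a row shorter than the first row (both scans read grid[i][j]
-- for every j < len(grid[0])).
def Pre_shortestSpread (grid : List (List Int)) : Prop :=
  grid ≠ [] ∧ ∀ row ∈ grid, (PySem.List.pyGetD grid 0 []).length ≤ row.length
instance (grid : List (List Int)) : Decidable (Pre_shortestSpread grid) := by
  unfold Pre_shortestSpread; infer_instance

def pvWitness_shortestSpread : List (List Int) := [[2, 1, 1], [1, 1, 0], [0, 1, 1]]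

def Spec_shortestSpread (grid : List (List Int)) (out : Int) : Prop := out = shortestSpread_alt grid
instance (grid : List (List Int)) (out : Int) : Decidable (Spec_shortestSpread grid out) := by
  unfold Spec_shortestSpread; infer_instance

-- ===== CLAIM (what is proved, stated in full; the proofs are below) =====
def Claim_equal_shortestSpread : Prop := ∀ (grid : List (List Int)), Dom_shortestSpread grid → Pre_shortestSpread grid → Spec_shortestSpread grid (shortestSpread grid)

-- ===== LEMMAS AND PROOFS =====

theorem pvCell_eq (g : List (List Int)) (i j : Int) (h0i : 0 ≤ i) (h0j : 0 ≤ j) :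
    pvCell g i j = ((g[i.toNat]?.getD [])[j.toNat]?).getD 0 := by
  unfold pvCell
  rw [PySem.List.pyGetD_of_nonneg _ _ h0i, PySem.List.pyGetD_of_nonneg _ _ h0j,
    List.getD_eq_getElem?_getD, List.getD_eq_getElem?_getD]

theorem pvSet2_eq (g : List (List Int)) (i j : Int) (h0i : 0 ≤ i) (h0j : 0 ≤ j) :
    pvSet2 g i j = g.set i.toNat ((g[i.toNat]?.getD []).set j.toNat 2) := by
  unfold pvSet2
  rw [PySem.List.pySetD_of_nonneg _ _ h0i, PySem.List.pySetD_of_nonneg _ _ h0j,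
    PySem.List.pyGetD_of_nonneg _ _ h0i, List.getD_eq_getElem?_getD]

-- cell reads away from the written cell are unchanged
theorem pvCell_set_ne (g : List (List Int)) (i j i' j' : Int) (h0i : 0 ≤ i) (h0j : 0 ≤ j)
    (h0i' : 0 ≤ i') (h0j' : 0 ≤ j') (hne : i' ≠ i ∨ j' ≠ j) :
    pvCell (pvSet2 g i j) i' j' = pvCell g i' j' := by
  rw [pvCell_eq _ _ _ h0i' h0j', pvCell_eq _ _ _ h0i' h0j', pvSet2_eq _ _ _ h0i h0j]
  rcases Decidable.em (i' = i) with hi | hi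
  · subst hi
    rcases hne with hne | hne
    · exact absurd rfl hne
    · by_cases hlen : i'.toNat < g.length
      · rw [List.getElem?_set_self hlen, List.getElem?_eq_getElem hlen]
        simp only [Option.getD_some]
        rw [List.getElem?_set_ne (by omega : j.toNat ≠ j'.toNat)]
      · rw [List.set_eq_of_length_le (by omega)]
  · rw [List.getElem?_set_ne (by omega : i.toNat ≠ i'.toNat)]

-- writing a 1-cell makes it 2
theorem pvCell_set_self (g : List (List Int)) (i j : Int) (h0i : 0 ≤ i) (h0j : 0 ≤ j)
    (h1 : pvCell g i j = 1) : pvCell (pvSet2 g i j) i j = 2 := by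
  rw [pvCell_eq _ _ _ h0i h0j] at h1
  rw [pvCell_eq _ _ _ h0i h0j, pvSet2_eq _ _ _ h0i h0j]
  have hgl : i.toNat < g.length := by
    by_contra h
    rw [List.getElem?_eq_none (l := g) (by omega)] at h1
    simp at h1
  rw [List.getElem?_eq_getElem hgl] at h1
  simp only [Option.getD_some] at h1
  have hrl : j.toNat < g[i.toNat].length := by
    by_contra h
    rw [List.getElem?_eq_none (l := g[i.toNat]) (by omega)] at h1
    simp at h1
  rw [List.getElem?_set_self hgl, List.getElem?_eq_getElem hgl]
  simp only [Option.getD_some]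
  rw [List.getElem?_set_self hrl]
  rfl

-- the count drops by exactly one at an infection
theorem pvCnt_set (M N : Int) (g : List (List Int)) (i j : Int) (h0i : 0 ≤ i) (hiM : i < M)
    (h0j : 0 ≤ j) (hjN : j < N) (h1 : pvCell g i j = 1) :
    pvCnt M N (pvSet2 g i j) + 1 = pvCnt M N g := by
  have hsM : PySem.List.pyRange 0 M 1 =
      PySem.List.pyRange 0 i 1 ++ (i :: PySem.List.pyRange (i + 1) M 1) := by
    rw [PySem.List.pyRange_one_append 0 i M h0i (le_of_lt hiM), PySem.List.pyRange_one_cons hiM]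
  have hsN : PySem.List.pyRange 0 N 1 =
      PySem.List.pyRange 0 j 1 ++ (j :: PySem.List.pyRange (j + 1) N 1) := by
    rw [PySem.List.pyRange_one_append 0 j N h0j (le_of_lt hjN), PySem.List.pyRange_one_cons hjN]
  have hside : ∀ i' : Int, i' ≠ i → 0 ≤ i' →
      ((PySem.List.pyRange 0 N 1).filter (fun j' => pvCell (pvSet2 g i j) i' j' == 1)).length =
      ((PySem.List.pyRange 0 N 1).filter (fun j' => pvCell g i' j' == 1)).length := by
    intro i' hne h0i'
    congr 1
    refine List.filter_congr (fun j' hj' => ?_)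
    have := (PySem.List.mem_pyRange_one.mp hj').1
    rw [pvCell_set_ne g i j i' j' h0i h0j h0i' this (Or.inl hne)]
  have hmid :
      ((PySem.List.pyRange 0 N 1).filter (fun j' => pvCell (pvSet2 g i j) i j' == 1)).length + 1 =
      ((PySem.List.pyRange 0 N 1).filter (fun j' => pvCell g i j' == 1)).length := by
    have hfc : ∀ (gg : List (List Int)),
        (PySem.List.pyRange 0 j 1).filter (fun j' => pvCell (pvSet2 g i j) i j' == 1) =
        (PySem.List.pyRange 0 j 1).filter (fun j' => pvCell g i j' == 1) := by
      intro _
      refine List.filter_congr (fun j' hj' => ?_)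
      obtain ⟨haa, hb⟩ := PySem.List.mem_pyRange_one.mp hj'
      rw [pvCell_set_ne g i j i j' h0i h0j h0i haa (Or.inr (by omega))]
    have hfc2 :
        (PySem.List.pyRange (j + 1) N 1).filter (fun j' => pvCell (pvSet2 g i j) i j' == 1) =
        (PySem.List.pyRange (j + 1) N 1).filter (fun j' => pvCell g i j' == 1) := by
      refine List.filter_congr (fun j' hj' => ?_)
      obtain ⟨ha, hb⟩ := PySem.List.mem_pyRange_one.mp hj'
      rw [pvCell_set_ne g i j i j' h0i h0j h0i (by omega) (Or.inr (by omega))]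
    have hc2 : pvCell (pvSet2 g i j) i j = 2 := pvCell_set_self g i j h0i h0j h1
    rw [hsN]
    simp only [List.filter_append, List.filter_cons, hc2, h1, List.length_append]
    rw [hfc g, hfc2]
    norm_num
    omega
  unfold pvCnt
  rw [hsM]
  simp only [List.map_append, List.sum_append, List.map_cons, List.sum_cons]
  have hL : (PySem.List.pyRange 0 i 1).map
        (fun i' => ((PySem.List.pyRange 0 N 1).filter (fun j' => pvCell (pvSet2 g i j) i' j' == 1)).length) =
      (PySem.List.pyRange 0 i 1).map
        (fun i' => ((PySem.List.pyRange 0 N 1).filter (fun j' => pvCell g i' j' == 1)).length) := by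
    refine List.map_congr_left (fun i' hi' => ?_)
    obtain ⟨ha, hb⟩ := PySem.List.mem_pyRange_one.mp hi'
    exact hside i' (by omega) ha
  have hR : (PySem.List.pyRange (i + 1) M 1).map
        (fun i' => ((PySem.List.pyRange 0 N 1).filter (fun j' => pvCell (pvSet2 g i j) i' j' == 1)).length) =
      (PySem.List.pyRange (i + 1) M 1).map
        (fun i' => ((PySem.List.pyRange 0 N 1).filter (fun j' => pvCell g i' j' == 1)).length) := by
    refine List.map_congr_left (fun i' hi' => ?_)
    obtain ⟨ha, hb⟩ := PySem.List.mem_pyRange_one.mp hi'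
    exact hside i' (by omega) (by omega)
  rw [hL, hR]
  omega

-- a 1-cell in range means the count is positive
theorem pvCnt_pos (M N : Int) (g : List (List Int)) (i j : Int) (h0i : 0 ≤ i) (hiM : i < M)
    (h0j : 0 ≤ j) (hjN : j < N) (h1 : pvCell g i j = 1) : 0 < pvCnt M N g := by
  have hi : i ∈ PySem.List.pyRange 0 M 1 := PySem.List.mem_pyRange_one.mpr ⟨h0i, hiM⟩
  have hj : j ∈ (PySem.List.pyRange 0 N 1).filter (fun j' => pvCell g i j' == 1) :=
    List.mem_filter.mpr ⟨PySem.List.mem_pyRange_one.mpr ⟨h0j, hjN⟩, by simp [h1]⟩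
  have hlen : 0 < ((PySem.List.pyRange 0 N 1).filter (fun j' => pvCell g i j' == 1)).length :=
    List.length_pos_of_mem hj
  have hmem : ((PySem.List.pyRange 0 N 1).filter (fun j' => pvCell g i j' == 1)).length ∈
      (PySem.List.pyRange 0 M 1).map
        (fun i' => ((PySem.List.pyRange 0 N 1).filter (fun j' => pvCell g i' j' == 1)).length) :=
    List.mem_map_of_mem hi
  unfold pvCnt
  exact lt_of_lt_of_le hlen (List.single_le_sum (fun x _ => Nat.zero_le x) _ hmem)

-- no 1-cell in the window means count zero
theorem pvCnt_zero (M N : Int) (g : List (List Int))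
    (h : ∀ i j : Int, 0 ≤ i → i < M → 0 ≤ j → j < N → pvCell g i j ≠ 1) :
    pvCnt M N g = 0 := by
  unfold pvCnt
  rw [List.sum_eq_zero]
  intro x hx
  obtain ⟨i, hi, rfl⟩ := List.mem_map.mp hx
  obtain ⟨h0i, hiM⟩ := PySem.List.mem_pyRange_one.mp hi
  rw [List.length_eq_zero_iff, List.filter_eq_nil_iff]
  intro j hj
  obtain ⟨h0j, hjN⟩ := PySem.List.mem_pyRange_one.mp hj
  simp [h i j h0i hiM h0j hjN]

theorem pvNbrA_def (M N : Int) (g : List (List Int)) (q : List (Int × Int)) (t : Int)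
    (p : Int × Int) : pvNbrA M N (g, q, t) p =
      if 0 ≤ p.1 ∧ p.1 < M ∧ 0 ≤ p.2 ∧ p.2 < N ∧ pvCell g p.1 p.2 = 1 then
        (pvSet2 g p.1 p.2, q ++ [p], t - 1)
      else (g, q, t) := rfl

-- A's neighbour fold: the queue accumulator is only appended to
theorem foldA_q (M N : Int) (ps : List (Int × Int)) (g : List (List Int))
    (q : List (Int × Int)) (t : Int) :
    ps.foldl (pvNbrA M N) (g, q, t) =
      ((ps.foldl (pvNbrA M N) (g, [], t)).1,
       q ++ (ps.foldl (pvNbrA M N) (g, [], t)).2.1,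
       (ps.foldl (pvNbrA M N) (g, [], t)).2.2) := by
  induction ps generalizing g q t with
  | nil => simp
  | cons p ps ih =>
    simp only [List.foldl_cons, pvNbrA_def]
    by_cases hC : 0 ≤ p.1 ∧ p.1 < M ∧ 0 ≤ p.2 ∧ p.2 < N ∧ pvCell g p.1 p.2 = 1
    · rw [if_pos hC, if_pos hC]
      simp only [List.nil_append]
      rw [ih _ (q ++ [p]) _, ih _ [p] _]
      simp
    · rw [if_neg hC, if_neg hC, ih _ q _]

-- invariant of A's neighbour fold: each appended cell is one fewer 1-cell
theorem foldA_master (M N : Int) (ps : List (Int × Int)) (g : List (List Int)) (t : Int)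
    (ht : t = (pvCnt M N g : Int)) :
    (ps.foldl (pvNbrA M N) (g, [], t)).2.2 =
        t - ((ps.foldl (pvNbrA M N) (g, [], t)).2.1.length : Int) ∧
      pvCnt M N (ps.foldl (pvNbrA M N) (g, [], t)).1 +
        (ps.foldl (pvNbrA M N) (g, [], t)).2.1.length = pvCnt M N g := by
  induction ps generalizing g t with
  | nil => simp [ht]
  | cons p ps ih =>
    simp only [List.foldl_cons, pvNbrA_def]
    by_cases hC : 0 ≤ p.1 ∧ p.1 < M ∧ 0 ≤ p.2 ∧ p.2 < N ∧ pvCell g p.1 p.2 = 1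
    · rw [if_pos hC]
      obtain ⟨ha, hb, hc, hd, he⟩ := hC
      have hcnt : pvCnt M N (pvSet2 g p.1 p.2) + 1 = pvCnt M N g :=
        pvCnt_set M N g p.1 p.2 ha hb hc hd he
      have ht1 : t - 1 = (pvCnt M N (pvSet2 g p.1 p.2) : Int) := by omega
      obtain ⟨ih1, ih2⟩ := ih (pvSet2 g p.1 p.2) (t - 1) ht1
      simp only [List.nil_append]
      rw [foldA_q M N ps _ [p] (t - 1)]
      constructor
      · rw [ih1]
        simp only [List.length_append, List.length_cons, List.length_nil]
        push_cast
        omega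
      · simp only [List.length_append, List.length_cons, List.length_nil]
        omega
    · rw [if_neg hC]
      exact ih g t ht

-- per-cell characterisation of A's neighbour fold over an arbitrary candidate list
theorem foldA_cell (M N : Int) (ps : List (Int × Int)) (g : List (List Int)) (t : Int)
    (i j : Int) (h0i : 0 ≤ i) (h0j : 0 ≤ j) :
    pvCell (ps.foldl (pvNbrA M N) (g, [], t)).1 i j =
      if 0 ≤ i ∧ i < M ∧ 0 ≤ j ∧ j < N ∧ pvCell g i j = 1 ∧ (i, j) ∈ ps then 2
      else pvCell g i j := by
  induction ps generalizing g t with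
  | nil => simp
  | cons p ps ih =>
    simp only [List.foldl_cons, pvNbrA_def]
    by_cases hC : 0 ≤ p.1 ∧ p.1 < M ∧ 0 ≤ p.2 ∧ p.2 < N ∧ pvCell g p.1 p.2 = 1
    · rw [if_pos hC]
      simp only [List.nil_append]
      rw [foldA_q M N ps _ [p] (t - 1)]
      simp only []
      rw [ih (pvSet2 g p.1 p.2) (t - 1)]
      by_cases hp : (i, j) = p
      · have hi : i = p.1 := by rw [← hp]
        have hj : j = p.2 := by rw [← hp]
        subst hi
        subst hj
        have h2 : pvCell (pvSet2 g p.1 p.2) p.1 p.2 = 2 :=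
          pvCell_set_self g p.1 p.2 hC.1 hC.2.2.1 hC.2.2.2.2
        rw [if_neg (by simp [h2]), h2,
          if_pos ⟨hC.1, hC.2.1, hC.2.2.1, hC.2.2.2.1, hC.2.2.2.2, by simp⟩]
      · have hcomp : p.1 ≠ i ∨ p.2 ≠ j := by
          by_contra h
          push_neg at h
          exact hp (by rw [← h.1, ← h.2])
        have hne : i ≠ p.1 ∨ j ≠ p.2 := by tauto
        have hcell : pvCell (pvSet2 g p.1 p.2) i j = pvCell g i j :=
          pvCell_set_ne g p.1 p.2 i j hC.1 hC.2.2.1 h0i h0j hne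
        rw [hcell]
        have hmem : ((i, j) ∈ p :: ps) ↔ ((i, j) ∈ ps) := by
          simp [hp]
        by_cases hrest : 0 ≤ i ∧ i < M ∧ 0 ≤ j ∧ j < N ∧ pvCell g i j = 1 ∧ (i, j) ∈ ps
        · rw [if_pos hrest, if_pos (by tauto)]
        · rw [if_neg hrest, if_neg (by rw [hmem]; exact hrest)]
    · rw [if_neg hC, ih g t]
      by_cases hp : (i, j) = p
      · subst hp
        have : ¬(0 ≤ i ∧ i < M ∧ 0 ≤ j ∧ j < N ∧ pvCell g i j = 1 ∧ (i, j) ∈ (i, j) :: ps) := by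
          intro h
          exact hC ⟨h.1, h.2.1, h.2.2.1, h.2.2.2.1, h.2.2.2.2.1⟩
        rw [if_neg this]
        by_cases hrest : 0 ≤ i ∧ i < M ∧ 0 ≤ j ∧ j < N ∧ pvCell g i j = 1 ∧ (i, j) ∈ ps
        · exact absurd ⟨hrest.1, hrest.2.1, hrest.2.2.1, hrest.2.2.2.1, hrest.2.2.2.2.1⟩ hC
        · rw [if_neg hrest]
      · have hmem : ((i, j) ∈ p :: ps) ↔ ((i, j) ∈ ps) := by simp [hp]
        by_cases hrest : 0 ≤ i ∧ i < M ∧ 0 ≤ j ∧ j < N ∧ pvCell g i j = 1 ∧ (i, j) ∈ ps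
        · rw [if_pos hrest, if_pos (by tauto)]
        · rw [if_neg hrest, if_neg (by rw [hmem]; exact hrest)]

-- membership characterisation of A's neighbour fold output queue
theorem foldA_mem (M N : Int) (ps : List (Int × Int)) (g : List (List Int)) (t : Int)
    (x : Int × Int) :
    x ∈ (ps.foldl (pvNbrA M N) (g, [], t)).2.1 ↔
      0 ≤ x.1 ∧ x.1 < M ∧ 0 ≤ x.2 ∧ x.2 < N ∧ pvCell g x.1 x.2 = 1 ∧ x ∈ ps := by
  induction ps generalizing g t with
  | nil => simp
  | cons p ps ih =>
    simp only [List.foldl_cons, pvNbrA_def]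
    by_cases hC : 0 ≤ p.1 ∧ p.1 < M ∧ 0 ≤ p.2 ∧ p.2 < N ∧ pvCell g p.1 p.2 = 1
    · rw [if_pos hC]
      simp only [List.nil_append]
      rw [foldA_q M N ps _ [p] (t - 1)]
      simp only [List.cons_append, List.nil_append, List.mem_cons]
      rw [ih (pvSet2 g p.1 p.2) (t - 1)]
      constructor
      · rintro (rfl | ⟨ha, hb, hc, hd, he, hf⟩)
        · exact ⟨hC.1, hC.2.1, hC.2.2.1, hC.2.2.2.1, hC.2.2.2.2, by simp⟩
        · have hxp : x ≠ p := by
            intro h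
            subst h
            rw [pvCell_set_self g x.1 x.2 hC.1 hC.2.2.1 hC.2.2.2.2] at he
            omega
          have hcell : pvCell (pvSet2 g p.1 p.2) x.1 x.2 = pvCell g x.1 x.2 := by
            refine pvCell_set_ne g p.1 p.2 x.1 x.2 hC.1 hC.2.2.1 ha hc ?_
            by_contra h
            push_neg at h
            exact hxp (Prod.ext_iff.mpr ⟨h.1, h.2⟩)
          rw [hcell] at he
          exact ⟨ha, hb, hc, hd, he, Or.inr hf⟩
      · rintro ⟨ha, hb, hc, hd, he, hf⟩
        rcases hf with rfl | hf
        · exact Or.inl rfl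
        · by_cases hxp2 : x = p
          · exact Or.inl hxp2
          · right
            have hcell : pvCell (pvSet2 g p.1 p.2) x.1 x.2 = pvCell g x.1 x.2 := by
              refine pvCell_set_ne g p.1 p.2 x.1 x.2 hC.1 hC.2.2.1 ha hc ?_
              by_contra h
              push_neg at h
              exact hxp2 (Prod.ext_iff.mpr ⟨h.1, h.2⟩)
            exact ⟨ha, hb, hc, hd, by rw [hcell]; exact he, hf⟩
    · rw [if_neg hC]
      rw [ih g t]
      constructor
      · rintro ⟨ha, hb, hc, hd, he, hf⟩
        exact ⟨ha, hb, hc, hd, he, List.mem_cons_of_mem _ hf⟩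
      · rintro ⟨ha, hb, hc, hd, he, hf⟩
        rcases List.mem_cons.mp hf with rfl | hf
        · exact absurd ⟨ha, hb, hc, hd, he⟩ hC
        · exact ⟨ha, hb, hc, hd, he, hf⟩

-- reference form of one whole round of A: process `pend`, collect the newly infected cells
def pvRound (M N : Int) : List (Int × Int) → List (List Int) → Int →
    List (List Int) × List (Int × Int) × Int
  | [], g, t => (g, [], t)
  | c :: pend, g, t =>
    let F := [(c.1 + 1, c.2), (c.1 - 1, c.2), (c.1, c.2 + 1), (c.1, c.2 - 1)].foldl
      (pvNbrA M N) (g, [], t)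
    let R := pvRound M N pend F.1 F.2.2
    (R.1, F.2.1 ++ R.2.1, R.2.2)

theorem pvPopsA_eq_round (M N : Int) (pend acc : List (Int × Int)) (g : List (List Int))
    (t : Int) :
    pvPopsA M N pend.length (g, pend ++ acc, t) =
      ((pvRound M N pend g t).1, acc ++ (pvRound M N pend g t).2.1,
       (pvRound M N pend g t).2.2) := by
  induction pend generalizing acc g t with
  | nil => simp [pvPopsA, pvRound]
  | cons c pend ih =>
    simp only [List.length_cons, List.cons_append, pvPopsA, pvStepA]
    rw [foldA_q M N _ g (pend ++ acc) t]
    have hassoc : pend ++ acc ++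
        (List.foldl (pvNbrA M N) (g, [], t) [(c.1 + 1, c.2), (c.1 - 1, c.2), (c.1, c.2 + 1), (c.1, c.2 - 1)]).2.1 =
        pend ++ (acc ++
        (List.foldl (pvNbrA M N) (g, [], t) [(c.1 + 1, c.2), (c.1 - 1, c.2), (c.1, c.2 + 1), (c.1, c.2 - 1)]).2.1) := by
      simp
    rw [hassoc, ih]
    simp [pvRound]

theorem pvRound_inv (M N : Int) (pend : List (Int × Int)) (g : List (List Int)) (t : Int)
    (ht : t = (pvCnt M N g : Int)) :
    (pvRound M N pend g t).2.2 = t - ((pvRound M N pend g t).2.1.length : Int) ∧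
      pvCnt M N (pvRound M N pend g t).1 + (pvRound M N pend g t).2.1.length =
        pvCnt M N g := by
  induction pend generalizing g t with
  | nil => simp [pvRound, ht]
  | cons c pend ih =>
    have hM := foldA_master M N [(c.1 + 1, c.2), (c.1 - 1, c.2), (c.1, c.2 + 1), (c.1, c.2 - 1)] g t ht
    have ht1 : (List.foldl (pvNbrA M N) (g, [], t)
        [(c.1 + 1, c.2), (c.1 - 1, c.2), (c.1, c.2 + 1), (c.1, c.2 - 1)]).2.2 =
        (pvCnt M N (List.foldl (pvNbrA M N) (g, [], t)
          [(c.1 + 1, c.2), (c.1 - 1, c.2), (c.1, c.2 + 1), (c.1, c.2 - 1)]).1 : Int) := by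
      omega
    have hIH := ih _ _ ht1
    simp only [pvRound]
    constructor
    · simp only [List.length_append]
      push_cast
      omega
    · simp only [List.length_append]
      omega

-- the neighbourhood of a cell, and the cells a round infects
def pvNbrs (i j : Int) : List (Int × Int) := [(i + 1, j), (i - 1, j), (i, j + 1), (i, j - 1)]

abbrev pvInf (M N : Int) (q : List (Int × Int)) (g : List (List Int)) (x : Int × Int) : Prop :=
  (0 ≤ x.1 ∧ x.1 < M ∧ 0 ≤ x.2 ∧ x.2 < N) ∧ pvCell g x.1 x.2 = 1 ∧
    ∃ c ∈ q, x ∈ pvNbrs c.1 c.2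

theorem mem_nbrs_symm (a b : Int × Int) : a ∈ pvNbrs b.1 b.2 ↔ b ∈ pvNbrs a.1 a.2 := by
  simp only [pvNbrs, List.mem_cons, List.not_mem_nil, or_false, Prod.ext_iff]
  omega

-- per-cell characterisation of one whole round
theorem pvRound_cell (M N : Int) (pend : List (Int × Int)) (g : List (List Int)) (t : Int)
    (i j : Int) (h0i : 0 ≤ i) (h0j : 0 ≤ j) :
    pvCell (pvRound M N pend g t).1 i j =
      if pvInf M N pend g (i, j) then 2 else pvCell g i j := by
  induction pend generalizing g t with
  | nil => simp [pvRound, pvInf]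
  | cons c pend ih =>
    simp only [pvRound]
    set nc := [(c.1 + 1, c.2), (c.1 - 1, c.2), (c.1, c.2 + 1), (c.1, c.2 - 1)] with hnc
    have hncn : nc = pvNbrs c.1 c.2 := rfl
    set F := nc.foldl (pvNbrA M N) (g, [], t) with hF
    rw [ih F.1 F.2.2]
    have hFc := foldA_cell M N nc g t i j h0i h0j
    by_cases hP : 0 ≤ i ∧ i < M ∧ 0 ≤ j ∧ j < N ∧ pvCell g i j = 1 ∧ (i, j) ∈ nc
    · rw [if_pos hP] at hFc
      have hInfc : pvInf M N (c :: pend) g (i, j) :=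
        ⟨⟨hP.1, hP.2.1, hP.2.2.1, hP.2.2.2.1⟩, hP.2.2.2.2.1,
          ⟨c, List.mem_cons_self, by rw [← hncn]; exact hP.2.2.2.2.2⟩⟩
      rw [if_pos hInfc]
      by_cases hQ : pvInf M N pend F.1 (i, j)
      · obtain ⟨_, hcell, _⟩ := hQ
        rw [hFc] at hcell
        omega
      · rw [if_neg hQ, hFc]
    · rw [if_neg hP] at hFc
      by_cases hQ : pvInf M N pend F.1 (i, j)
      · rw [if_pos hQ]
        obtain ⟨hw, hcell, c', hc', hadj⟩ := hQ
        rw [hFc] at hcell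
        rw [if_pos ⟨hw, hcell, ⟨c', List.mem_cons_of_mem _ hc', hadj⟩⟩]
      · rw [if_neg hQ, hFc]
        by_cases hR : pvInf M N (c :: pend) g (i, j)
        · obtain ⟨hw, hcell, c', hc', hadj⟩ := hR
          rcases List.mem_cons.mp hc' with rfl | hc'
          · exact absurd ⟨hw.1, hw.2.1, hw.2.2.1, hw.2.2.2, hcell, by rw [hncn]; exact hadj⟩ hP
          · exact absurd ⟨hw, by rw [hFc]; exact hcell, ⟨c', hc', hadj⟩⟩ hQ
        · rw [if_neg hR]

-- membership characterisation of the newly infected list of one round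
theorem pvRound_mem (M N : Int) (pend : List (Int × Int)) (g : List (List Int)) (t : Int)
    (x : Int × Int) :
    x ∈ (pvRound M N pend g t).2.1 ↔ pvInf M N pend g x := by
  induction pend generalizing g t with
  | nil => simp [pvRound, pvInf]
  | cons c pend ih =>
    simp only [pvRound, List.mem_append]
    set nc := [(c.1 + 1, c.2), (c.1 - 1, c.2), (c.1, c.2 + 1), (c.1, c.2 - 1)] with hnc
    have hncn : nc = pvNbrs c.1 c.2 := rfl
    set F := nc.foldl (pvNbrA M N) (g, [], t) with hF
    rw [ih F.1 F.2.2, foldA_mem M N nc g t x]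
    constructor
    · rintro (⟨ha, hb, hc, hd, he, hf⟩ | ⟨hw, hcell, c', hc', hadj⟩)
      · exact ⟨⟨ha, hb, hc, hd⟩, he, ⟨c, List.mem_cons_self, by rw [← hncn]; exact hf⟩⟩
      · have hFc := foldA_cell M N nc g t x.1 x.2 hw.1 hw.2.2.1
        by_cases hP : 0 ≤ x.1 ∧ x.1 < M ∧ 0 ≤ x.2 ∧ x.2 < N ∧ pvCell g x.1 x.2 = 1 ∧ (x.1, x.2) ∈ nc
        · rw [if_pos hP] at hFc
          rw [hFc] at hcell
          omega
        · rw [if_neg hP] at hFc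
          rw [hFc] at hcell
          exact ⟨hw, hcell, ⟨c', List.mem_cons_of_mem _ hc', hadj⟩⟩
    · rintro ⟨hw, hcell, c', hc', hadj⟩
      have hFc := foldA_cell M N nc g t x.1 x.2 hw.1 hw.2.2.1
      by_cases hP : 0 ≤ x.1 ∧ x.1 < M ∧ 0 ≤ x.2 ∧ x.2 < N ∧ pvCell g x.1 x.2 = 1 ∧ (x.1, x.2) ∈ nc
      · left
        exact ⟨hP.1, hP.2.1, hP.2.2.1, hP.2.2.2.1, hP.2.2.2.2.1, hP.2.2.2.2.2⟩
      · right
        rw [if_neg hP] at hFc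
        rcases List.mem_cons.mp hc' with rfl | hc'
        · exact absurd ⟨hw.1, hw.2.1, hw.2.2.1, hw.2.2.2, hcell, by rw [hncn]; exact hadj⟩ hP
        · exact ⟨hw, by rw [hFc]; exact hcell, ⟨c', hc', hadj⟩⟩

-- exits of the loops are fuel-independent
theorem loopA_exit (M N : Int) (f : Nat) (st : List (List Int) × List (Int × Int) × Int)
    (turn : Int) (h : ¬(st.2.2 ≠ 0 ∧ st.2.1 ≠ [])) :
    pvLoopA M N f st turn = if st.2.2 ≠ 0 then -1 else turn := by
  cases f with
  | zero => rfl
  | succ f =>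
    simp only [pvLoopA]
    rw [if_neg h]

theorem pvLoopA_step (M N : Int) (f : Nat) (g : List (List Int)) (q : List (Int × Int))
    (t turn : Int) (h : t ≠ 0 ∧ q ≠ []) :
    pvLoopA M N (f + 1) (g, q, t) turn =
      pvLoopA M N f (pvPopsA M N q.length (g, q, t)) (turn + 1) := by
  simp only [pvLoopA]
  rw [if_pos h]

theorem loopCA_exit (M N : Int) (f : Nat) (w : List (List Int)) (turns : Int)
    (h : pvAnyOne w = false) : pvLoopCA M N f w turns = turns := by
  cases f with
  | zero => simp [pvLoopCA, h]
  | succ f => simp [pvLoopCA, h]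

-- enough fuel makes pvLoopA's value fuel-independent
theorem loopA_irrel (M N : Int) (m : Nat) : ∀ (f₁ f₂ : Nat) (g : List (List Int))
    (q : List (Int × Int)) (t turn : Int), t = (pvCnt M N g : Int) →
    pvCnt M N g + 1 ≤ m → m ≤ f₁ → m ≤ f₂ →
    pvLoopA M N f₁ (g, q, t) turn = pvLoopA M N f₂ (g, q, t) turn := by
  induction m with
  | zero => intro f₁ f₂ g q t turn ht hm h1 h2; omega
  | succ m ih =>
    intro f₁ f₂ g q t turn ht hm h1 h2
    by_cases hcond : t ≠ 0 ∧ q ≠ []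
    · obtain ⟨f₁', rfl⟩ : ∃ k, f₁ = k + 1 := ⟨f₁ - 1, by omega⟩
      obtain ⟨f₂', rfl⟩ : ∃ k, f₂ = k + 1 := ⟨f₂ - 1, by omega⟩
      rw [pvLoopA_step _ _ _ _ _ _ _ hcond, pvLoopA_step _ _ _ _ _ _ _ hcond]
      have hP := pvPopsA_eq_round M N q [] g t
      rw [List.append_nil] at hP
      simp only [List.nil_append] at hP
      rw [hP]
      have hinv := pvRound_inv M N q g t ht
      by_cases hnew : (pvRound M N q g t).2.1 = []
      · have ht' : (pvRound M N q g t).2.2 = t := by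
          rw [hinv.1, hnew]
          simp
        rw [loopA_exit _ _ _ _ _ (by simp [hnew]), loopA_exit _ _ _ _ _ (by simp [hnew])]
      · have hlp : 0 < (pvRound M N q g t).2.1.length := List.length_pos_iff.mpr hnew
        exact ih f₁' f₂' _ _ _ _ (by omega) (by omega) (by omega) (by omega)
    · rw [loopA_exit _ _ f₁ _ _ hcond, loopA_exit _ _ f₂ _ _ hcond]

-- rectangular grids and window equality
def pvRect (M N : Int) (w : List (List Int)) : Prop :=
  w.length = M.toNat ∧ ∀ r ∈ w, r.length = N.toNat

-- cell reads of a comprehension-built grid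
theorem mapGrid_cell (M N : Int) (f : Int → Int → Int) (i j : Int)
    (h0i : 0 ≤ i) (hiM : i < M) (h0j : 0 ≤ j) (hjN : j < N) :
    pvCell ((PySem.List.pyRange 0 M 1).map (fun i =>
      (PySem.List.pyRange 0 N 1).map (fun j => f i j))) i j = f i j := by
  unfold pvCell
  rw [PySem.List.pyGetD_map_pyRange_of_nonneg _ M i [] h0i hiM,
    PySem.List.pyGetD_map_pyRange_of_nonneg _ N j 0 h0j hjN]

theorem mapGrid_rect (M N : Int) (f : Int → Int → Int) :
    pvRect M N ((PySem.List.pyRange 0 M 1).map (fun i =>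
      (PySem.List.pyRange 0 N 1).map (fun j => f i j))) := by
  constructor
  · rw [List.length_map, PySem.List.length_pyRange_one]
    simp
  · intro r hr
    obtain ⟨i, _, rfl⟩ := List.mem_map.mp hr
    rw [List.length_map, PySem.List.length_pyRange_one]
    simp

-- equality of a comprehension-built grid with a rectangular grid is pointwise
theorem mapGrid_eq_iff (M N : Int) (f : Int → Int → Int) (w : List (List Int))
    (hw : pvRect M N w) :
    ((PySem.List.pyRange 0 M 1).map (fun i =>
      (PySem.List.pyRange 0 N 1).map (fun j => f i j)) = w) ↔
    (∀ i j : Int, 0 ≤ i → i < M → 0 ≤ j → j < N → f i j = pvCell w i j) := by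
  constructor
  · intro h i j h0i hiM h0j hjN
    rw [← h, mapGrid_cell M N f i j h0i hiM h0j hjN]
  · intro h
    apply List.ext_getElem
    · rw [List.length_map, PySem.List.length_pyRange_one, hw.1]
      simp
    · intro k hk1 hk2
      rw [List.getElem_map, PySem.List.getElem_pyRange_one]
      apply List.ext_getElem
      · rw [List.length_map, PySem.List.length_pyRange_one, hw.2 _ (List.getElem_mem hk2)]
        simp
      · intro l hl1 hl2
        rw [List.getElem_map, PySem.List.getElem_pyRange_one]
        have hkM : (k : Int) < M := by
          rw [List.length_map, PySem.List.length_pyRange_one] at hk1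
          omega
        have hlN : (l : Int) < N := by
          rw [List.length_map, PySem.List.length_pyRange_one] at hl1
          omega
        have := h (k : Int) (l : Int) (by positivity) hkM (by positivity) hlN
        simp only [zero_add] at this ⊢
        rw [this, pvCell_eq w _ _ (by positivity) (by positivity)]
        simp only [Int.toNat_natCast]
        rw [List.getElem?_eq_getElem hk2]
        simp only [Option.getD_some]
        rw [List.getElem?_eq_getElem hl2]
        rfl

-- pvHot unfolded to a proposition
theorem pvHot_iff (M N : Int) (g : List (List Int)) (i j : Int) :
    pvHot M N g i j = true ↔
      pvCell g i j = 1 ∧ ∃ p ∈ pvNbrs i j,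
        (0 ≤ p.1 ∧ p.1 < M ∧ 0 ≤ p.2 ∧ p.2 < N) ∧ pvCell g p.1 p.2 = 2 := by
  simp [pvHot, pvNbrs]

-- count of the window depends only on window reads
theorem pvCnt_congr (M N : Int) (g w : List (List Int))
    (h : ∀ i j : Int, 0 ≤ i → i < M → 0 ≤ j → j < N → pvCell w i j = pvCell g i j) :
    pvCnt M N w = pvCnt M N g := by
  unfold pvCnt
  congr 1
  refine List.map_congr_left (fun i hi => ?_)
  obtain ⟨h0i, hiM⟩ := PySem.List.mem_pyRange_one.mp hi
  congr 1
  refine List.filter_congr (fun j hj => ?_)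
  obtain ⟨h0j, hjN⟩ := PySem.List.mem_pyRange_one.mp hj
  rw [h i j h0i hiM h0j hjN]

-- count ≠ 0 produces a concrete 1-cell
theorem pvCnt_ne_exists (M N : Int) (g : List (List Int)) (h : pvCnt M N g ≠ 0) :
    ∃ i j : Int, 0 ≤ i ∧ i < M ∧ 0 ≤ j ∧ j < N ∧ pvCell g i j = 1 := by
  by_contra hno
  push_neg at hno
  exact h (pvCnt_zero M N g (fun i j h0i hiM h0j hjN h1 =>
    by have := hno i j; tauto))

-- anyOne on a rectangular grid reads the window
theorem pvAnyOne_iff (M N : Int) (w : List (List Int)) (hw : pvRect M N w) :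
    pvAnyOne w = true ↔
      ∃ i j : Int, 0 ≤ i ∧ i < M ∧ 0 ≤ j ∧ j < N ∧ pvCell w i j = 1 := by
  unfold pvAnyOne
  rw [List.any_eq_true]
  constructor
  · rintro ⟨row, hrow, hc⟩
    rw [List.any_eq_true] at hc
    obtain ⟨c, hcm, hc1⟩ := hc
    obtain ⟨k, hk, rfl⟩ := List.mem_iff_getElem.mp hrow
    obtain ⟨l, hl, rfl⟩ := List.mem_iff_getElem.mp hcm
    have hkM : (k : Int) < M := by
      have := hw.1
      omega
    have hlN : (l : Int) < N := by
      have := hw.2 _ (List.getElem_mem hk)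
      omega
    refine ⟨(k : Int), (l : Int), by positivity, hkM, by positivity, hlN, ?_⟩
    rw [pvCell_eq w _ _ (by positivity) (by positivity)]
    simp only [Int.toNat_natCast]
    rw [List.getElem?_eq_getElem hk]
    simp only [Option.getD_some]
    rw [List.getElem?_eq_getElem hl]
    simpa using hc1
  · rintro ⟨i, j, h0i, hiM, h0j, hjN, h1⟩
    have hk : i.toNat < w.length := by
      have := hw.1
      omega
    refine ⟨w[i.toNat], List.getElem_mem hk, ?_⟩
    rw [List.any_eq_true]
    have hl : j.toNat < w[i.toNat].length := by
      have := hw.2 _ (List.getElem_mem hk)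
      omega
    refine ⟨w[i.toNat][j.toNat], List.getElem_mem hl, ?_⟩
    rw [pvCell_eq w i j h0i h0j, List.getElem?_eq_getElem hk] at h1
    simp only [Option.getD_some] at h1
    rw [List.getElem?_eq_getElem hl] at h1
    simpa using h1

-- hot in the synchronous grid ↔ infected by the round, under the frontier invariant
theorem hot_iff_inf (M N : Int) (g w : List (List Int)) (q : List (Int × Int))
    (hWEq : ∀ i j : Int, 0 ≤ i → i < M → 0 ≤ j → j < N → pvCell w i j = pvCell g i j)
    (hQ2 : ∀ c ∈ q, (0 ≤ c.1 ∧ c.1 < M ∧ 0 ≤ c.2 ∧ c.2 < N) ∧ pvCell g c.1 c.2 = 2)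
    (hINV : ∀ (i j : Int) (p : Int × Int), 0 ≤ i → i < M → 0 ≤ j → j < N →
      pvCell g i j = 1 → p ∈ pvNbrs i j → 0 ≤ p.1 → p.1 < M → 0 ≤ p.2 → p.2 < N →
      pvCell g p.1 p.2 = 2 → p ∈ q)
    (i j : Int) (h0i : 0 ≤ i) (hiM : i < M) (h0j : 0 ≤ j) (hjN : j < N) :
    pvHot M N w i j = true ↔ pvInf M N q g (i, j) := by
  rw [pvHot_iff]
  constructor
  · rintro ⟨h1, p, hp, hpw, hp2⟩
    rw [hWEq i j h0i hiM h0j hjN] at h1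
    rw [hWEq p.1 p.2 hpw.1 hpw.2.1 hpw.2.2.1 hpw.2.2.2] at hp2
    have hpq : p ∈ q := hINV i j p h0i hiM h0j hjN h1 hp hpw.1 hpw.2.1 hpw.2.2.1 hpw.2.2.2 hp2
    exact ⟨⟨h0i, hiM, h0j, hjN⟩, h1, ⟨p, hpq, (mem_nbrs_symm (i, j) p).mpr hp⟩⟩
  · rintro ⟨hw, h1, c, hc, hadj⟩
    obtain ⟨hcw, hc2⟩ := hQ2 c hc
    refine ⟨by rw [hWEq i j h0i hiM h0j hjN]; exact h1, c, ?_, hcw,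
      by rw [hWEq c.1 c.2 hcw.1 hcw.2.1 hcw.2.2.1 hcw.2.2.2]; exact hc2⟩
    exact (mem_nbrs_symm c (i, j)).mpr hadj

-- the main simulation: BFS rounds equal synchronous fixpoint iteration
theorem mainSim (M N : Int) (n : Nat) : ∀ (g : List (List Int)) (q : List (Int × Int))
    (t turn : Int) (w : List (List Int)) (fB : Nat),
    pvCnt M N g = n → t = (pvCnt M N g : Int) →
    (∀ c ∈ q, (0 ≤ c.1 ∧ c.1 < M ∧ 0 ≤ c.2 ∧ c.2 < N) ∧ pvCell g c.1 c.2 = 2) →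
    (∀ (i j : Int) (p : Int × Int), 0 ≤ i → i < M → 0 ≤ j → j < N →
      pvCell g i j = 1 → p ∈ pvNbrs i j → 0 ≤ p.1 → p.1 < M → 0 ≤ p.2 → p.2 < N →
      pvCell g p.1 p.2 = 2 → p ∈ q) →
    pvRect M N w →
    (∀ i j : Int, 0 ≤ i → i < M → 0 ≤ j → j < N → pvCell w i j = pvCell g i j) →
    n + 1 ≤ fB →
    pvLoopA M N (n + 1) (g, q, t) turn = pvLoopCA M N fB w turn := by
  induction n using Nat.strong_induction_on with
  | _ n ih =>
    intro g q t turn w fB hn ht hQ2 hINV hrect hWEq hfB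
    have hcw : pvCnt M N w = pvCnt M N g := pvCnt_congr M N g w hWEq
    by_cases ht0 : t = 0
    · rw [loopA_exit _ _ _ _ _ (by simp [ht0])]
      have hany : pvAnyOne w = false := by
        rw [← Bool.not_eq_true]
        intro h
        obtain ⟨i, j, h0i, hiM, h0j, hjN, h1⟩ := (pvAnyOne_iff M N w hrect).mp h
        have := pvCnt_pos M N w i j h0i hiM h0j hjN h1
        omega
      rw [loopCA_exit _ _ _ _ _ hany]
      simp [ht0]
    · have hcnt0 : pvCnt M N g ≠ 0 := by
        intro h
        rw [h] at ht
        exact ht0 (by rw [ht]; rfl)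
      have hany : pvAnyOne w = true := by
        rw [pvAnyOne_iff M N w hrect]
        obtain ⟨i, j, h0i, hiM, h0j, hjN, h1⟩ := pvCnt_ne_exists M N g hcnt0
        exact ⟨i, j, h0i, hiM, h0j, hjN, by rw [hWEq i j h0i hiM h0j hjN]; exact h1⟩
      obtain ⟨fB', rfl⟩ : ∃ k, fB = k + 1 := ⟨fB - 1, by omega⟩
      have hhot := hot_iff_inf M N g w q hWEq hQ2 hINV
      -- no cell is infected ↔ the synchronous step is the identity
      have hstepEq : (pvStepCA M N w = w) ↔ (∀ x : Int × Int, ¬ pvInf M N q g x) := by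
        unfold pvStepCA
        rw [mapGrid_eq_iff M N _ w hrect]
        constructor
        · intro h x hx
          obtain ⟨⟨h0i, hiM, h0j, hjN⟩, h1, hex⟩ := hx
          have hhx : pvHot M N w x.1 x.2 = true := by
            rw [hhot x.1 x.2 h0i hiM h0j hjN]
            exact ⟨⟨h0i, hiM, h0j, hjN⟩, h1, hex⟩
          have := h x.1 x.2 h0i hiM h0j hjN
          rw [if_pos hhx] at this
          rw [hWEq x.1 x.2 h0i hiM h0j hjN] at this
          omega
        · intro h i j h0i hiM h0j hjN
          have hhx : pvHot M N w i j = false := by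
            rw [← Bool.not_eq_true, hhot i j h0i hiM h0j hjN]
            exact h (i, j)
          rw [hhx]
          simp
      cases q with
      | nil =>
        rw [loopA_exit _ _ _ _ _ (by simp)]
        have hid : pvStepCA M N w = w := by
          rw [hstepEq]
          rintro x ⟨_, _, c, hc, _⟩
          exact absurd hc (List.not_mem_nil)
        simp only [pvLoopCA]
        rw [if_pos hany, if_pos hid]
        simp [ht0]
      | cons c q' =>
        have hcond : t ≠ 0 ∧ c :: q' ≠ [] := ⟨ht0, by simp⟩
        obtain ⟨n', rfl⟩ : ∃ k, n = k + 1 := ⟨n - 1, by omega⟩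
        rw [pvLoopA_step _ _ _ _ _ _ _ hcond]
        have hP := pvPopsA_eq_round M N (c :: q') [] g t
        rw [List.append_nil] at hP
        simp only [List.nil_append] at hP
        rw [hP]
        have hinv := pvRound_inv M N (c :: q') g t ht
        simp only [pvLoopCA]
        rw [if_pos hany]
        by_cases hnew : (pvRound M N (c :: q') g t).2.1 = []
        · -- fruitless round: A does one more turn then exits with -1; CA detects the fixpoint
          have hnoinf : ∀ x : Int × Int, ¬ pvInf M N (c :: q') g x := by
            intro x hx
            rw [← pvRound_mem M N (c :: q') g t x] at hx
            rw [hnew] at hx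
            exact absurd hx (List.not_mem_nil)
          rw [if_pos (hstepEq.mpr hnoinf)]
          have ht' : (pvRound M N (c :: q') g t).2.2 = t := by
            rw [hinv.1, hnew]
            simp
          rw [loopA_exit _ _ _ _ _ (by simp [hnew])]
          simp [ht', ht0]
        · -- productive round
          have hsome : ∃ x, pvInf M N (c :: q') g x := by
            obtain ⟨x, hx⟩ := List.exists_mem_of_ne_nil _ hnew
            exact ⟨x, (pvRound_mem M N (c :: q') g t x).mp hx⟩
          have hne : ¬(pvStepCA M N w = w) := by
            intro h
            obtain ⟨x, hx⟩ := hsome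
            exact (hstepEq.mp h) x hx
          rw [if_neg hne]
          set g' := (pvRound M N (c :: q') g t).1 with hg'
          set newly := (pvRound M N (c :: q') g t).2.1 with hnewly
          set t' := (pvRound M N (c :: q') g t).2.2 with ht'
          have hlp : 0 < newly.length := List.length_pos_iff.mpr hnew
          have ht'c : t' = (pvCnt M N g' : Int) := by omega
          have hn' : pvCnt M N g' < n' + 1 := by omega
          -- fix A's fuel to cnt g' + 1
          have hAf := loopA_irrel M N (pvCnt M N g' + 1) (n' + 1) (pvCnt M N g' + 1)
            g' newly t' (turn + 1) ht'c (le_refl _) (by omega) (le_refl _)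
          rw [hAf]
          -- invariants for the next iteration
          have hQ2' : ∀ x ∈ newly, (0 ≤ x.1 ∧ x.1 < M ∧ 0 ≤ x.2 ∧ x.2 < N) ∧
              pvCell g' x.1 x.2 = 2 := by
            intro x hx
            have hinf := (pvRound_mem M N (c :: q') g t x).mp hx
            have hw := hinf.1
            refine ⟨hw, ?_⟩
            rw [hg', pvRound_cell M N (c :: q') g t x.1 x.2 hw.1 hw.2.2.1, if_pos hinf]
          have hINV' : ∀ (i j : Int) (p : Int × Int), 0 ≤ i → i < M → 0 ≤ j → j < N →
              pvCell g' i j = 1 → p ∈ pvNbrs i j → 0 ≤ p.1 → p.1 < M → 0 ≤ p.2 → p.2 < N →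
              pvCell g' p.1 p.2 = 2 → p ∈ newly := by
            intro i j p h0i hiM h0j hjN h1 hadj h0p1 hpM h0p2 hpN hp2
            rw [hg', pvRound_cell M N (c :: q') g t i j h0i h0j] at h1
            rw [hg', pvRound_cell M N (c :: q') g t p.1 p.2 h0p1 h0p2] at hp2
            split_ifs at h1 with hinfij
            · omega
            · split_ifs at hp2 with hinfp
              · rw [hnewly, pvRound_mem M N (c :: q') g t p]
                exact hinfp
              · -- p was already 2 in g: old invariant puts p in the old queue, so (i,j)
                -- would have been infected, contradicting g' (i,j) = 1
                have hpq := hINV i j p h0i hiM h0j hjN h1 hadj h0p1 hpM h0p2 hpN hp2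
                exact absurd ⟨⟨h0i, hiM, h0j, hjN⟩, h1,
                  ⟨p, hpq, (mem_nbrs_symm (i, j) p).mpr hadj⟩⟩ hinfij
          have hrect' : pvRect M N (pvStepCA M N w) := mapGrid_rect M N _
          have hWEq' : ∀ i j : Int, 0 ≤ i → i < M → 0 ≤ j → j < N →
              pvCell (pvStepCA M N w) i j = pvCell g' i j := by
            intro i j h0i hiM h0j hjN
            unfold pvStepCA
            rw [mapGrid_cell M N _ i j h0i hiM h0j hjN]
            rw [hg', pvRound_cell M N (c :: q') g t i j h0i h0j]
            by_cases hinf : pvInf M N (c :: q') g (i, j)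
            · rw [if_pos hinf, if_pos ((hhot i j h0i hiM h0j hjN).mpr hinf)]
            · rw [if_neg hinf, if_neg (by rw [hhot i j h0i hiM h0j hjN]; exact hinf),
                hWEq i j h0i hiM h0j hjN]
          exact ih (pvCnt M N g') hn' g' newly t' (turn + 1) (pvStepCA M N w) fB'
            rfl ht'c hQ2' hINV' hrect' hWEq' (by omega)

-- A's initial scan: queue and count
theorem scanInner (g : List (List Int)) (i : Int) (js : List Int)
    (q : List (Int × Int)) (t : Int) :
    js.foldl (fun qt j =>
      if pvCell g i j = 2 then (qt.1 ++ [(i, j)], qt.2)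
      else if pvCell g i j = 1 then (qt.1, qt.2 + 1) else qt) (q, t) =
    (q ++ (js.filter (fun j => pvCell g i j == 2)).map (fun j => (i, j)),
     t + ((js.filter (fun j => pvCell g i j == 1)).length : Int)) := by
  induction js generalizing q t with
  | nil => simp
  | cons j js ih =>
    simp only [List.foldl_cons, List.filter_cons]
    by_cases h2 : pvCell g i j = 2
    · rw [if_pos h2, ih]
      simp [h2]
    · rw [if_neg h2]
      by_cases h1 : pvCell g i j = 1
      · rw [if_pos h1, ih]
        have hb2 : (pvCell g i j == 2) = false := by simp [h1]
        have hb1 : (pvCell g i j == 1) = true := by simp [h1]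
        simp only [hb2, hb1, Bool.false_eq_true, if_false, if_true, List.length_cons]
        refine congrArg _ ?_
        push_cast
        ring
      · rw [if_neg h1, ih]
        simp [h1, h2]

theorem scanOuter (g : List (List Int)) (N : Int) (is : List Int)
    (q : List (Int × Int)) (t : Int) :
    is.foldl (fun qt i =>
      (PySem.List.pyRange 0 N 1).foldl (fun qt j =>
        if pvCell g i j = 2 then (qt.1 ++ [(i, j)], qt.2)
        else if pvCell g i j = 1 then (qt.1, qt.2 + 1) else qt) qt) (q, t) =
    (q ++ is.flatMap (fun i =>
        ((PySem.List.pyRange 0 N 1).filter (fun j => pvCell g i j == 2)).map (fun j => (i, j))),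
     t + ((is.map (fun i =>
        ((PySem.List.pyRange 0 N 1).filter (fun j => pvCell g i j == 1)).length)).sum : Int)) := by
  induction is generalizing q t with
  | nil => simp
  | cons i is ih =>
    simp only [List.foldl_cons, List.flatMap_cons, List.map_cons, List.sum_cons]
    rw [scanInner, ih]
    refine Prod.ext ?_ ?_
    · simp
    · simp only []
      push_cast
      ring

-- A's initial scan produces the 2-cells of the window and the 1-count
theorem pvScanA_eq (g : List (List Int)) (M N : Int) :
    pvScanA g M N =
      ((PySem.List.pyRange 0 M 1).flatMap (fun i =>
        ((PySem.List.pyRange 0 N 1).filter (fun j => pvCell g i j == 2)).map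
          (fun j => (i, j))), (pvCnt M N g : Int)) := by
  unfold pvScanA pvCnt
  rw [scanOuter]
  simp

-- membership in the scan queue
theorem scan_mem (g : List (List Int)) (M N : Int) (x : Int × Int) :
    x ∈ (pvScanA g M N).1 ↔
      (0 ≤ x.1 ∧ x.1 < M ∧ 0 ≤ x.2 ∧ x.2 < N) ∧ pvCell g x.1 x.2 = 2 := by
  rw [pvScanA_eq]
  simp only [List.mem_flatMap, List.mem_map, List.mem_filter, PySem.List.mem_pyRange_one]
  constructor
  · rintro ⟨i, ⟨h0i, hiM⟩, j, ⟨⟨h0j, hjN⟩, h2⟩, rfl⟩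
    exact ⟨⟨h0i, hiM, h0j, hjN⟩, by simpa using h2⟩
  · rintro ⟨⟨h0i, hiM, h0j, hjN⟩, h2⟩
    exact ⟨x.1, ⟨h0i, hiM⟩, x.2, ⟨⟨h0j, hjN⟩, by simpa using h2⟩, rfl⟩

-- ===== VERDICT (by name: the statement is the Claim_ definition above) =====
theorem shortestSpread_spec : Claim_equal_shortestSpread := by
  intro grid _ _
  show shortestSpread grid = shortestSpread_alt grid
  unfold shortestSpread shortestSpread_alt
  simp only []
  set M : Int := (grid.length : Int) with hM
  set N : Int := ((PySem.List.pyGetD grid 0 []).length : Int) with hN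
  have hWEq0 : forall i j : Int, 0 <= i -> i < M -> 0 <= j -> j < N ->
      pvCell (pvCopy grid M N) i j = pvCell grid i j := by
    intro i j h0i hiM h0j hjN
    unfold pvCopy
    exact mapGrid_cell M N _ i j h0i hiM h0j hjN
  have hcw : pvCnt M N (pvCopy grid M N) = pvCnt M N grid := pvCnt_congr M N grid _ hWEq0
  have h2 : (pvScanA grid M N).2 = (pvCnt M N grid : Int) := by rw [pvScanA_eq]
  rw [h2, hcw]
  simp only [Int.toNat_natCast]
  refine mainSim M N (pvCnt M N grid) grid (pvScanA grid M N).1 _ 0 (pvCopy grid M N)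
    (pvCnt M N grid + 1) rfl rfl ?_ ?_ (by unfold pvCopy; exact mapGrid_rect M N _)
    hWEq0 (le_refl _)
  · intro c hc
    exact (scan_mem grid M N c).mp hc
  · intro i j p h0i hiM h0j hjN h1 hadj h0p1 hpM h0p2 hpN hp2
    exact (scan_mem grid M N p).mpr ⟨⟨h0p1, hpM, h0p2, hpN⟩, hp2⟩
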